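-- pv_equiv track=rewrite | github.com/layer6ai-labs/conformal-importance-summarization | src/utils.py | combine_conversations
-- ===== SOURCE A (Python) =====
-- def combine_conversations(conversation):
--     """
--     Used to process the MTS dialogue dataset
--     Combines a list of conversation sentences where each sentence starts with "Doctor:" or "Patient:".
--     It concatenates a doctor's sentence with all immediately following patient sentences,
--
--     Returns a list of combined conversation strings.
--     """
--     sentences = [sentence.strip() for sentence in conversation.replace('\r', '').split('\n') if sentence.strip()]
--     combined = []  # List to hold combined conversation segments.
--     current = ""  # Holds the current conversation segment.
--
--     for sentence in sentences:
--         sentence = sentence.strip()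
--         # If it's a doctor's sentence, start a new conversation segment.
--         if sentence.startswith("Doctor:"):
--             if current:
--                 combined.append(current)
--             current = sentence
--         # If it's a patient's sentence, append it to the current segment.
--         elif sentence.startswith("Patient:"):
--             # Append with a space so the sentences join naturally.
--             if current:
--                 current += " " + sentence
--             else:
--                 current = sentence  # In case conversation starts with Patient (unlikely but handled).
--         else:
--             # If there is no role-indicator, simply add it to the current segment.
--             current += " " + sentence
--     if current:
--         combined.append(current)
--
--     # Finally, remove the role-indicators.
--     final_combined = [
--         s.strip() for s in combined
--         # s.replace("Doctor:", "").replace("Patient:", "").strip() for s in combined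
--     ]
--     return final_combined
-- ===== SOURCE B (Python) =====
-- def combine_conversations(conversation):
--     """Recursive segmentation: a segment is the first line plus the run of
--     following lines that do not start with 'Doctor:'; recurse on the rest,
--     then join each segment with spaces and strip."""
--     sentences = [s.strip() for s in conversation.replace('\r', '').split('\n') if s.strip()]
--
--     def segments(lines):
--         if not lines:
--             return []
--         body = []
--         rest = lines[1:]
--         while rest and not rest[0].startswith("Doctor:"):
--             body.append(rest[0])
--             rest = rest[1:]
--         return [[lines[0]] + body] + segments(rest)
--
--     return [' '.join(seg).strip() for seg in segments(sentences)]
-- ===== Notes on version B (the rewrite author's own statement) =====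
-- stated objective: alternative
-- what changed: Replaces A's single-pass three-branch state machine with a running string accumulator by a recursive segmentation: each segment is the first remaining line plus the following run of non-'Doctor:' lines (a span), recursing on the rest, followed by a separate join-and-strip pass per segment.
import Mathlib
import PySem

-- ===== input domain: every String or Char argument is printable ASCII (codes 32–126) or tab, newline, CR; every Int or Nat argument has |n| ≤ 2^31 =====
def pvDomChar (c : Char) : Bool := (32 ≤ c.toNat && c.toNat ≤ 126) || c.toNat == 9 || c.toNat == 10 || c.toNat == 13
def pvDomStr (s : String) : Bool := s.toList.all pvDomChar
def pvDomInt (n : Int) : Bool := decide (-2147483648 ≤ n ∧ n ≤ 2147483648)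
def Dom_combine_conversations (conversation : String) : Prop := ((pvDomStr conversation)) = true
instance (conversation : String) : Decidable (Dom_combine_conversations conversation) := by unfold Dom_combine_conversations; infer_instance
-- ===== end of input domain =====

-- B is simpler: recursive segmentation (first line + following non-'Doctor:' run, recurse),
-- then join+strip each segment — instead of A's three-branch running-string state machine.

-- ===== PORT A =====
-- shared preprocessing line: [sentence.strip() for sentence in conversation.replace('\r','').split('\n') if sentence.strip()]
def pvSentences (conversation : String) : List String :=
  (((PySem.Str.split? (PySem.Str.replace conversation "\r" "") "\n").getD []).filter
    (fun s => PySem.Str.strip s ≠ "")).map PySem.Str.strip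

-- loop body of A: state = (combined, current)
def pvStepA (st : List String × String) (sentence : String) : List String × String :=
  let sentence := PySem.Str.strip sentence
  if PySem.Str.startswith sentence "Doctor:" then
    ((if st.2 ≠ "" then st.1 ++ [st.2] else st.1), sentence)
  else if PySem.Str.startswith sentence "Patient:" then
    (st.1, if st.2 ≠ "" then PySem.Str.join " " [st.2, sentence] else sentence)
  else
    (st.1, PySem.Str.join " " [st.2, sentence])

def combine_conversations (conversation : String) : List String :=
  let st := (pvSentences conversation).foldl pvStepA ([], "")
  let combined := if st.2 ≠ "" then st.1 ++ [st.2] else st.1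
  combined.map PySem.Str.strip

-- ===== PORT B =====
-- the inner while loop of Source B's `segments`: consume the run of lines not starting
-- with "Doctor:", returning (body, rest)
def pvSpan : List String → List String × List String
  | [] => ([], [])
  | s :: rest =>
    if PySem.Str.startswith s "Doctor:" then ([], s :: rest)
    else
      let p := pvSpan rest
      (s :: p.1, p.2)

theorem pvSpan_snd_length (l : List String) : (pvSpan l).2.length ≤ l.length := by
  induction l with
  | nil => simp [pvSpan]
  | cons s rest ih =>
    unfold pvSpan
    split
    · simp
    · simpa using Nat.le_succ_of_le ih

-- Source B's recursive `segments`
def pvSegmentsB : List String → List (List String)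
  | [] => []
  | s :: rest =>
    let p := pvSpan rest
    (s :: p.1) :: pvSegmentsB p.2
termination_by l => l.length
decreasing_by
  simpa using Nat.lt_succ_of_le (pvSpan_snd_length rest)

def combine_conversations_alt (conversation : String) : List String :=
  (pvSegmentsB (pvSentences conversation)).map
    (fun seg => PySem.Str.strip (PySem.Str.join " " seg))

-- ===== PRECONDITION & SPEC =====
def Spec_combine_conversations (conversation : String) (out : List String) : Prop := out = combine_conversations_alt conversation
instance (conversation : String) (out : List String) : Decidable (Spec_combine_conversations conversation out) := by unfold Spec_combine_conversations; infer_instance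

-- ===== CLAIM (what is proved, stated in full; the proofs are below) =====
def Claim_equal_combine_conversations : Prop := ∀ (conversation : String), Dom_combine_conversations conversation → Spec_combine_conversations conversation (combine_conversations conversation)

-- ===== LEMMAS AND PROOFS =====

-- proof-only intermediate device: a grouping fold related to A's fold by an invariant,
-- and shown to produce exactly pvSegmentsB's segments
def pvStepB (st : List (List String) × List String) (s : String) :
    List (List String) × List String :=
  if PySem.Str.startswith s "Doctor:" && !st.2.isEmpty then
    (st.1 ++ [st.2], [s])
  else
    (st.1, st.2 ++ [s])

def pvFinB (st : List (List String) × List String) : List (List String) :=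
  if st.2.isEmpty then st.1 else st.1 ++ [st.2]

-- the characters of ' '.join(g)
def pvGroupJoin (g : List String) : List Char :=
  PySem.Chars.join [' '] (g.map String.toList)

-- A's running string is the join of the current group, possibly with one extra leading space
def pvCurRel (c : String) (g : List String) : Prop :=
  c.toList = pvGroupJoin g ∨ c.toList = ' ' :: pvGroupJoin g

-- invariant tying A's loop state to the grouping fold's state
def pvInv (a : List String × String) (b : List (List String) × List String) : Prop :=
  (a.2 = "" ↔ b.2 = []) ∧ (b.2 = [] ∨ pvCurRel a.2 b.2) ∧ List.Forall₂ pvCurRel a.1 b.1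

theorem pvGroupJoin_singleton (s : String) : pvGroupJoin [s] = s.toList := by
  simp [pvGroupJoin, PySem.Chars.join_singleton]

theorem pvGroupJoin_append (g : List String) (hg : g ≠ []) (s : String) :
    pvGroupJoin (g ++ [s]) = pvGroupJoin g ++ ' ' :: s.toList := by
  induction g with
  | nil => simp at hg
  | cons x xs ih =>
    cases xs with
    | nil =>
      simp [pvGroupJoin, PySem.Chars.join_singleton, PySem.Chars.join_cons_cons]
    | cons y ys =>
      have h := ih (by simp)
      simp only [pvGroupJoin, List.cons_append, List.map_cons, List.map_append,
        List.map_nil, PySem.Chars.join_cons_cons] at h ⊢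
      simp [h]

theorem pvStrip_cons_space (cs : List Char) :
    PySem.Chars.strip (' ' :: cs) = PySem.Chars.strip cs := by
  simp [PySem.Chars.strip, PySem.Chars.lstrip, List.dropWhile, PySem.Chars.isspace]

-- A's stripped segment equals the stripped join of the group
theorem pvStrip_rel (c : String) (g : List String) (h : pvCurRel c g) :
    PySem.Str.strip c = PySem.Str.strip (PySem.Str.join " " g) := by
  have hsp : (" " : String).toList = [' '] := by decide
  have hj : (PySem.Str.join " " g).toList = pvGroupJoin g := by
    simp only [PySem.Str.toList_join, pvGroupJoin, hsp]
  rcases h with h | h <;>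
    simp [PySem.Str.strip, h, hj, pvStrip_cons_space]

theorem pvStartswith_ne_empty (s p : String) (hp : p ≠ "")
    (h : PySem.Str.startswith s p = true) : s ≠ "" := by
  intro hs
  subst hs
  have h' : p.toList <+: ("" : String).toList := by
    have := (PySem.Chars.startswith_iff ("" : String).toList p.toList).mp
      (by simpa [PySem.Str.startswith] using h)
    exact this
  have hnil : p.toList = [] := by
    rw [show ("" : String).toList = [] from rfl] at h'
    exact List.prefix_nil.mp h'
  exact hp (String.toList_inj.mp (by simp [hnil]))

theorem pvJoin_two_toList (c s : String) :
    (PySem.Str.join " " [c, s]).toList = c.toList ++ ' ' :: s.toList := by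
  have hsp : (" " : String).toList = [' '] := by decide
  simp [PySem.Str.toList_join, List.map_cons, List.map_nil,
    PySem.Chars.join_cons_cons, PySem.Chars.join_singleton, hsp]

theorem pvJoin_two_ne (c s : String) : PySem.Str.join " " [c, s] ≠ "" := by
  intro h
  have h2 := congrArg String.toList h
  rw [pvJoin_two_toList] at h2
  simp at h2

-- strip is idempotent (so re-stripping the already-stripped sentences is the identity)
theorem pvDropWhile_idem {α : Type} (p : α → Bool) (l : List α) :
    (l.dropWhile p).dropWhile p = l.dropWhile p := by
  cases h : l.dropWhile p with
  | nil => rfl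
  | cons c t =>
    have hne : l.dropWhile p ≠ [] := by simp [h]
    have hpc : p c = false := by
      have := List.head_dropWhile_not p hne
      simpa [h] using this
    simp [hpc]

theorem pvLstrip_rstrip (m : List Char) (hm : PySem.Chars.lstrip m = m) :
    PySem.Chars.lstrip (PySem.Chars.rstrip m) = PySem.Chars.rstrip m := by
  have hsuf : PySem.Chars.rstrip m <+: m := by
    have h0 := List.dropWhile_suffix (l := m.reverse) PySem.Chars.isspace
    rcases h0 with ⟨t, ht⟩
    exact ⟨t.reverse, by
      have := congrArg List.reverse ht
      simpa [PySem.Chars.rstrip] using this⟩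
  cases h : PySem.Chars.rstrip m with
  | nil => rfl
  | cons c t =>
    rcases hsuf with ⟨r, hr⟩
    rw [h] at hr
    have hm' : m = c :: (t ++ r) := by rw [← hr]; simp
    have hpc : PySem.Chars.isspace c = false := by
      by_contra hc
      have hc' : PySem.Chars.isspace c = true := by
        cases hcc : PySem.Chars.isspace c
        · exact absurd hcc hc
        · rfl
      have hlen := congrArg List.length hm
      rw [hm'] at hlen
      conv_lhs at hlen => rw [show PySem.Chars.lstrip (c :: (t ++ r))
        = PySem.Chars.lstrip (t ++ r) from by simp [PySem.Chars.lstrip, hc']]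
      have hle : (PySem.Chars.lstrip (t ++ r)).length ≤ (t ++ r).length :=
        List.length_dropWhile_le _ _
      simp only [List.length_cons, List.length_append] at hlen hle
      omega
    simp [PySem.Chars.lstrip, hpc]

theorem pvStrip_idem (l : List Char) :
    PySem.Chars.strip (PySem.Chars.strip l) = PySem.Chars.strip l := by
  have h1 : PySem.Chars.lstrip (PySem.Chars.lstrip l) = PySem.Chars.lstrip l :=
    pvDropWhile_idem _ l
  have h2 : PySem.Chars.lstrip (PySem.Chars.rstrip (PySem.Chars.lstrip l))
      = PySem.Chars.rstrip (PySem.Chars.lstrip l) := pvLstrip_rstrip _ h1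
  have h3 : PySem.Chars.rstrip (PySem.Chars.rstrip (PySem.Chars.lstrip l))
      = PySem.Chars.rstrip (PySem.Chars.lstrip l) := by
    simp [PySem.Chars.rstrip, pvDropWhile_idem]
  calc PySem.Chars.strip (PySem.Chars.strip l)
      = PySem.Chars.rstrip (PySem.Chars.lstrip (PySem.Chars.rstrip (PySem.Chars.lstrip l))) := rfl
    _ = PySem.Chars.rstrip (PySem.Chars.rstrip (PySem.Chars.lstrip l)) := by rw [h2]
    _ = PySem.Chars.strip l := h3

theorem pvStrStrip_idem (s : String) :
    PySem.Str.strip (PySem.Str.strip s) = PySem.Str.strip s := by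
  simp [PySem.Str.strip, pvStrip_idem]

theorem pvSentences_stripped (conversation : String) (s : String)
    (hs : s ∈ pvSentences conversation) : PySem.Str.strip s = s := by
  unfold pvSentences at hs
  rcases List.mem_map.mp hs with ⟨t, _, ht⟩
  rw [← ht]
  exact pvStrStrip_idem t

theorem pvForall₂_append {α β : Type} {R : α → β → Prop} {l₁ u₁ : List α} {l₂ u₂ : List β}
    (h : List.Forall₂ R l₁ l₂) (h2 : List.Forall₂ R u₁ u₂) :
    List.Forall₂ R (l₁ ++ u₁) (l₂ ++ u₂) := by
  induction h with
  | nil => exact h2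
  | cons hx _ ih => exact List.Forall₂.cons hx ih

-- one loop step preserves the invariant
theorem pvInv_step (a : List String × String) (b : List (List String) × List String)
    (s : String) (hs : PySem.Str.strip s = s) (h : pvInv a b) :
    pvInv (pvStepA a s) (pvStepB b s) := by
  obtain ⟨hiff, hcur, hall⟩ := h
  have hgrel : b.2 ≠ [] → pvCurRel a.2 b.2 := by
    intro hg
    rcases hcur with h2 | h2
    · exact absurd h2 hg
    · exact h2
  by_cases hD : PySem.Str.startswith s "Doctor:" = true
  · have hDc : PySem.Chars.startswith s.toList ['D','o','c','t','o','r',':'] = true := by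
      simpa using hD
    have hsne : s ≠ "" := pvStartswith_ne_empty s _ (by decide) hD
    by_cases he : a.2 = ""
    · have hb : b.2 = [] := hiff.mp he
      have ha : pvStepA a s = (a.1, s) := by simp [pvStepA, hs, hDc, he]
      have hbeq : pvStepB b s = (b.1, [s]) := by simp [pvStepB, hDc, hb]
      rw [ha, hbeq]
      exact ⟨by simp [hsne], Or.inr (Or.inl (by simpa using (pvGroupJoin_singleton s).symm)), hall⟩
    · have hb : b.2 ≠ [] := fun h2 => he (hiff.mpr h2)
      have ha : pvStepA a s = (a.1 ++ [a.2], s) := by simp [pvStepA, hs, hDc, he]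
      have hbeq : pvStepB b s = (b.1 ++ [b.2], [s]) := by
        simp [pvStepB, hDc, List.isEmpty_eq_false_iff.mpr hb]
      rw [ha, hbeq]
      exact ⟨by simp [hsne], Or.inr (Or.inl (by simpa using (pvGroupJoin_singleton s).symm)),
        pvForall₂_append hall (List.Forall₂.cons (hgrel hb) List.Forall₂.nil)⟩
  · have hD' : PySem.Str.startswith s "Doctor:" = false :=
      Bool.eq_false_iff.mpr (fun h2 => hD h2)
    have hDc : PySem.Chars.startswith s.toList ['D','o','c','t','o','r',':'] = false := by
      simpa using hD'
    have hbeq : pvStepB b s = (b.1, b.2 ++ [s]) := by simp [pvStepB, hDc]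
    have hg' : b.2 ++ [s] ≠ [] := by simp
    have hrelne : a.2 ≠ "" → pvCurRel (PySem.Str.join " " [a.2, s]) (b.2 ++ [s]) := by
      intro he
      have hb : b.2 ≠ [] := fun h2 => he (hiff.mpr h2)
      rcases hgrel hb with hc | hc
      · exact Or.inl (by rw [pvJoin_two_toList, hc, pvGroupJoin_append _ hb])
      · exact Or.inr (by rw [pvJoin_two_toList, hc, pvGroupJoin_append _ hb]; rfl)
    by_cases hP : PySem.Str.startswith s "Patient:" = true
    · have hPc : PySem.Chars.startswith s.toList ['P','a','t','i','e','n','t',':'] = true := by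
        simpa using hP
      have hsne : s ≠ "" := pvStartswith_ne_empty s _ (by decide) hP
      by_cases he : a.2 = ""
      · have hb : b.2 = [] := hiff.mp he
        have ha : pvStepA a s = (a.1, s) := by simp [pvStepA, hs, hDc, hPc, he]
        rw [ha, hbeq]
        refine ⟨by simp [hsne, hg'], Or.inr (Or.inl ?_), hall⟩
        rw [hb, List.nil_append, pvGroupJoin_singleton]
      · have ha : pvStepA a s = (a.1, PySem.Str.join " " [a.2, s]) := by
          simp [pvStepA, hs, hDc, hPc, he]
        rw [ha, hbeq]
        exact ⟨by simp [pvJoin_two_ne, hg'], Or.inr (hrelne he), hall⟩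
    · have hP' : PySem.Str.startswith s "Patient:" = false :=
        Bool.eq_false_iff.mpr (fun h2 => hP h2)
      have hPc : PySem.Chars.startswith s.toList ['P','a','t','i','e','n','t',':'] = false := by
        simpa using hP'
      have ha : pvStepA a s = (a.1, PySem.Str.join " " [a.2, s]) := by
        simp [pvStepA, hs, hDc, hPc]
      rw [ha, hbeq]
      by_cases he : a.2 = ""
      · have hb : b.2 = [] := hiff.mp he
        refine ⟨by simp [pvJoin_two_ne, hg'], Or.inr (Or.inr ?_), hall⟩
        rw [pvJoin_two_toList, he, hb, List.nil_append, pvGroupJoin_singleton]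
        rfl
      · exact ⟨by simp [pvJoin_two_ne, hg'], Or.inr (hrelne he), hall⟩

-- the two folds stay related
theorem pvInv_foldl (L : List String) (hL : ∀ s ∈ L, PySem.Str.strip s = s)
    (a : List String × String) (b : List (List String) × List String) (h : pvInv a b) :
    pvInv (L.foldl pvStepA a) (L.foldl pvStepB b) := by
  induction L generalizing a b with
  | nil => exact h
  | cons x xs ih =>
    exact ih (fun s hs => hL s (List.mem_cons_of_mem _ hs)) _ _
      (pvInv_step a b x (hL x (List.mem_cons_self)) h)

theorem pvMap_strip_eq (cs : List String) (gs : List (List String))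
    (h : List.Forall₂ pvCurRel cs gs) :
    cs.map PySem.Str.strip = gs.map (fun g => PySem.Str.strip (PySem.Str.join " " g)) := by
  induction h with
  | nil => rfl
  | cons hrel _ ih => simp [ih, pvStrip_rel _ _ hrel]

-- the grouping fold, once a group is open, produces the span-based segments
theorem pvFinB_foldl (L : List String) (G : List (List String)) (g : List String)
    (hg : g ≠ []) :
    pvFinB (L.foldl pvStepB (G, g))
      = G ++ (g ++ (pvSpan L).1) :: pvSegmentsB (pvSpan L).2 := by
  induction L generalizing G g with
  | nil =>
    simp [pvFinB, List.isEmpty_eq_false_iff.mpr hg, pvSpan, pvSegmentsB]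
  | cons x xs ih =>
    by_cases hD : PySem.Str.startswith x "Doctor:" = true
    · have hDc : PySem.Chars.startswith x.toList ['D','o','c','t','o','r',':'] = true := by
        simpa using hD
      have hstep : pvStepB (G, g) x = (G ++ [g], [x]) := by
        simp [pvStepB, hDc, List.isEmpty_eq_false_iff.mpr hg]
      have hspan : pvSpan (x :: xs) = ([], x :: xs) := by simp [pvSpan, hDc]
      rw [List.foldl_cons, hstep, ih _ _ (by simp), hspan]
      rw [pvSegmentsB]
      simp
    · have hD' : PySem.Str.startswith x "Doctor:" = false :=
        Bool.eq_false_iff.mpr (fun h2 => hD h2)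
      have hDc : PySem.Chars.startswith x.toList ['D','o','c','t','o','r',':'] = false := by
        simpa using hD'
      have hstep : pvStepB (G, g) x = (G, g ++ [x]) := by simp [pvStepB, hDc]
      have hspan1 : (pvSpan (x :: xs)).1 = x :: (pvSpan xs).1 := by simp [pvSpan, hDc]
      have hspan2 : (pvSpan (x :: xs)).2 = (pvSpan xs).2 := by simp [pvSpan, hDc]
      rw [List.foldl_cons, hstep, ih _ _ (by simp), hspan1, hspan2]
      simp

-- from the empty start state the grouping fold produces exactly the segments
theorem pvFinB_top (L : List String) :
    pvFinB (L.foldl pvStepB ([], [])) = pvSegmentsB L := by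
  cases L with
  | nil => simp [pvFinB, pvSegmentsB]
  | cons s rest =>
    have hstep : pvStepB ([], []) s = ([], [s]) := by simp [pvStepB]
    rw [List.foldl_cons, hstep, pvFinB_foldl rest [] [s] (by simp)]
    rw [pvSegmentsB]
    simp

-- ===== VERDICT (by name: the statement is the Claim_ definition above) =====
theorem combine_conversations_spec : Claim_equal_combine_conversations := by
  intro conversation _
  unfold Spec_combine_conversations combine_conversations combine_conversations_alt
  have h := pvInv_foldl (pvSentences conversation) (pvSentences_stripped conversation)
    ([], "") ([], []) ⟨by simp, Or.inl rfl, List.Forall₂.nil⟩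
  obtain ⟨hiff, hcur, hall⟩ := h
  set stA := (pvSentences conversation).foldl pvStepA ([], "")
  set stB := (pvSentences conversation).foldl pvStepB ([], []) with hstB
  rw [← pvFinB_top (pvSentences conversation), ← hstB]
  by_cases he : stA.2 = ""
  · have hb : stB.2 = [] := hiff.mp he
    simp [he, hb, pvFinB, pvMap_strip_eq _ _ hall]
  · have hb : stB.2 ≠ [] := fun h2 => he (hiff.mpr h2)
    rcases hcur with h2 | hrel
    · exact absurd h2 hb
    · simp [he, pvFinB, List.isEmpty_eq_false_iff.mpr hb, pvMap_strip_eq _ _ hall,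
        pvStrip_rel _ _ hrel]
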